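-- pv_equiv track=rewrite | github.com/Fasthei/Enhancing-Character-Mining-System-Based-on-Artificial-Intelligence | ExtractRelationshipsFunction/ExtractRelationships/__init__.py | are_co_occurring
-- ===== SOURCE A (Python) =====
-- def are_co_occurring(name1, name2, text, window_size=100):
--     """判断两个名字是否在文本的同一窗口内共现"""
--     if not text:
--         return False
--
--     for i in range(max(0, len(text) - window_size + 1)):
--         window = text[i:i + window_size]
--         if name1 in window and name2 in window:
--             return True
--     return False
-- ===== SOURCE B (Python) =====
-- def are_co_occurring(name1, name2, text, window_size=100):
--     """One left-to-right pass over start positions, remembering the latest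
--     occurrence of each name; no window strings are materialised."""
--     if not text:
--         return False
--     l1, l2 = len(name1), len(name2)
--     last1 = last2 = None
--     for i in range(len(text) + 1):
--         if text.startswith(name1, i):
--             last1 = i
--             if last2 is not None and max(i + l1, last2 + l2) - last2 <= window_size:
--                 return True
--         if text.startswith(name2, i):
--             last2 = i
--             if last1 is not None and max(last1 + l1, i + l2) - last1 <= window_size:
--                 return True
--     return False
-- ===== Notes on version B (the rewrite author's own statement) =====
-- stated objective: faster
-- what changed: A slides a window over the text and runs two substring searches inside every O(window_size) window; B makes a single pass over start positions with O(1)-typical startswith tests, remembering the latest occurrence of each name and testing the span of the newest pair, so no window strings are built and the per-position cost no longer depends on window_size.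
-- intended difference: On non-empty texts shorter than window_size that contain both names, A returns False (its range(max(0, len-w+1)) loop is empty, an off-by-one that skips the only window) while B returns True, which is the intended answer since both names co-occur within one window. — e.g. on are_co_occurring("a", "b", "ab", 100): A returns false, B returns true
-- outside the precondition, e.g. on are_co_occurring('a', 'b', 'abc', -1): A returns True, B returns False
import Mathlib
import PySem

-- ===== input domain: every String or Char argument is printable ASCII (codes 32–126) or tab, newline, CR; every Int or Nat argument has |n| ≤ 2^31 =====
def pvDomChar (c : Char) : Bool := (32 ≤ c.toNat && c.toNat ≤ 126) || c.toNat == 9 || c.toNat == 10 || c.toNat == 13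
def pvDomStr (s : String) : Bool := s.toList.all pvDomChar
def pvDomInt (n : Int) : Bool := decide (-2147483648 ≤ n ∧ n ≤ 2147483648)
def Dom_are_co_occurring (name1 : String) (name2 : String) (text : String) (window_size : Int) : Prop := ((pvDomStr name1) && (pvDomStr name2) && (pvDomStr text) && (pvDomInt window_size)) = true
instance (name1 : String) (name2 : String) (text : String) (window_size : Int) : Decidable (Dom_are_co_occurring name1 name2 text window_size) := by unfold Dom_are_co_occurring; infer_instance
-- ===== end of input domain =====

-- B replaces A's sliding-window substring scans by one pass over start positions that
-- remembers the latest occurrence of each name (measured faster in a timing run);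
-- B intentionally returns True on texts shorter than the window that contain both names (D_).


-- ===== PORT A =====
def are_co_occurring (name1 : String) (name2 : String) (text : String) (window_size : Int) : Bool :=
  if text = "" then false
  else
    (PySem.List.pyRange 0 (max 0 (PySem.Str.len text - window_size + 1)) 1).any fun i =>
      let window := PySem.Str.slice text (some i) (some (i + window_size))
      PySem.Str.isIn name1 window && PySem.Str.isIn name2 window

-- ===== PORT B =====
-- loop over the start positions (the list is range(len(text)+1)), carrying the latest
-- occurrence position of each name; checks the span of a pair as soon as it exists
def altLoop (a b cs : List Char) (l1 l2 ws : Int) :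
    List Int → Option Int → Option Int → Bool
  | [], _, _ => false
  | i :: rest, last1, last2 =>
    -- text.startswith(name, i) ported by hand as slice-equality: exact for the
    -- 0 ≤ i ≤ len(text) this loop uses
    let s1 : Bool := PySem.List.slice cs (some i) (some (i + l1)) == a
    let last1' := if s1 then some i else last1
    let fire1 : Bool := s1 && (match last2 with
      | some q => decide (max (i + l1) (q + l2) - q ≤ ws)
      | none => false)
    let s2 : Bool := PySem.List.slice cs (some i) (some (i + l2)) == b
    let last2' := if s2 then some i else last2
    let fire2 : Bool := s2 && (match last1' with
      | some p => decide (max (p + l1) (i + l2) - p ≤ ws)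
      | none => false)
    if fire1 || fire2 then true else altLoop a b cs l1 l2 ws rest last1' last2'

def are_co_occurring_alt (name1 : String) (name2 : String) (text : String) (window_size : Int) : Bool :=
  if text = "" then false
  else
    altLoop name1.toList name2.toList text.toList
      (PySem.Str.len name1) (PySem.Str.len name2) window_size
      (PySem.List.pyRange 0 (PySem.Str.len text + 1) 1) none none

-- ===== PRECONDITION & SPEC =====
-- Pre_ excludes negative window sizes (outside the function's natural domain): there A's
-- slice arithmetic wraps and compares names against windows taken from the text's end.
def Pre_are_co_occurring (name1 : String) (name2 : String) (text : String) (window_size : Int) : Prop :=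
  0 ≤ window_size
instance (name1 : String) (name2 : String) (text : String) (window_size : Int) : Decidable (Pre_are_co_occurring name1 name2 text window_size) := by unfold Pre_are_co_occurring; infer_instance

def pvWitness_are_co_occurring : String × String × String × Int := ("ab", "cd", "abxcd", 5)

-- On non-empty texts shorter than window_size that contain both names, A returns false (its
-- range(max(0, len-w+1)) loop is empty — an off-by-one that skips the only window) while B
-- returns true, the intended answer since both names co-occur within one window.
def D_are_co_occurring (name1 : String) (name2 : String) (text : String) (window_size : Int) : Prop :=
  text ≠ "" ∧ PySem.Str.len text < window_size ∧
    PySem.Str.isIn name1 text = true ∧ PySem.Str.isIn name2 text = true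
instance (name1 : String) (name2 : String) (text : String) (window_size : Int) : Decidable (D_are_co_occurring name1 name2 text window_size) := by unfold D_are_co_occurring; infer_instance

def Spec_are_co_occurring (name1 : String) (name2 : String) (text : String) (window_size : Int) (out : Bool) : Prop := ¬ D_are_co_occurring name1 name2 text window_size → out = are_co_occurring_alt name1 name2 text window_size
instance (name1 : String) (name2 : String) (text : String) (window_size : Int) (out : Bool) : Decidable (Spec_are_co_occurring name1 name2 text window_size out) := by unfold Spec_are_co_occurring; infer_instance

def pvDiffWitness_are_co_occurring : String × String × String × Int := ("a", "b", "ab", 100)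
def pvDiffWitnessOut_are_co_occurring : Bool × Bool := (false, true)

-- ===== CLAIM (what is proved, stated in full; the proofs are below) =====
def Claim_unchanged_are_co_occurring : Prop := ∀ (name1 : String) (name2 : String) (text : String) (window_size : Int), Dom_are_co_occurring name1 name2 text window_size → Pre_are_co_occurring name1 name2 text window_size → Spec_are_co_occurring name1 name2 text window_size (are_co_occurring name1 name2 text window_size)
def Claim_changed_are_co_occurring : Prop := Dom_are_co_occurring (pvDiffWitness_are_co_occurring.1) (pvDiffWitness_are_co_occurring.2.1) (pvDiffWitness_are_co_occurring.2.2.1) (pvDiffWitness_are_co_occurring.2.2.2) ∧ Pre_are_co_occurring (pvDiffWitness_are_co_occurring.1) (pvDiffWitness_are_co_occurring.2.1) (pvDiffWitness_are_co_occurring.2.2.1) (pvDiffWitness_are_co_occurring.2.2.2) ∧ D_are_co_occurring (pvDiffWitness_are_co_occurring.1) (pvDiffWitness_are_co_occurring.2.1) (pvDiffWitness_are_co_occurring.2.2.1) (pvDiffWitness_are_co_occurring.2.2.2) ∧ are_co_occurring (pvDiffWitness_are_co_occurring.1) (pvDiffWitness_are_co_occurring.2.1) (pvDiffWitness_are_co_occurring.2.2.1)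 (pvDiffWitness_are_co_occurring.2.2.2) = pvDiffWitnessOut_are_co_occurring.1 ∧ are_co_occurring_alt (pvDiffWitness_are_co_occurring.1) (pvDiffWitness_are_co_occurring.2.1) (pvDiffWitness_are_co_occurring.2.2.1) (pvDiffWitness_are_co_occurring.2.2.2) = pvDiffWitnessOut_are_co_occurring.2 ∧ pvDiffWitnessOut_are_co_occurring.1 ≠ pvDiffWitnessOut_are_co_occurring.2
def Claim_exact_are_co_occurring : Prop := ∀ (name1 : String) (name2 : String) (text : String) (window_size : Int), Dom_are_co_occurring name1 name2 text window_size → Pre_are_co_occurring name1 name2 text window_size → D_are_co_occurring name1 name2 text window_size → are_co_occurring name1 name2 text window_size ≠ are_co_occurring_alt name1 name2 text window_size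

-- ===== LEMMAS AND PROOFS =====

-- name occurs (as a substring) at start position p
abbrev OccAt (name cs : List Char) (p : Nat) : Prop := name <+: cs.drop p

-- the pair of occurrences (p, q) fits inside one window of size ws
def SpanOk (l1 l2 ws : Int) (p q : Nat) : Prop :=
  max ((p : Int) + l1) ((q : Int) + l2) ≤ min (p : Int) (q : Int) + ws

-- both names occur, in one common window of size ws
def CoSpec (a b cs : List Char) (ws : Int) : Prop :=
  ∃ p q : Nat, p ≤ cs.length ∧ q ≤ cs.length ∧ OccAt a cs p ∧ OccAt b cs q ∧
    SpanOk a.length b.length ws p q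

-- `last` is a sound lower bound: any occurrence below t is dominated by a stored occurrence
def InvLast (name cs : List Char) (t : Nat) (last : Option Int) : Prop :=
  (∀ x, last = some x → ∃ r : Nat, x = (r : Int) ∧ r < t ∧ OccAt name cs r) ∧
  (∀ p : Nat, p < t → OccAt name cs p → ∃ r : Nat, last = some (r : Int) ∧ p ≤ r ∧ r < t ∧ OccAt name cs r)

lemma spanOk_mono_q {l1 l2 ws : Int} {p q r : Nat} (hqr : q ≤ r) (hrp : r ≤ p)
    (h : SpanOk l1 l2 ws p q) : SpanOk l1 l2 ws p r := by
  unfold SpanOk at *; omega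

lemma spanOk_diag {l1 l2 ws : Int} {p r : Nat} (h : SpanOk l1 l2 ws p p) :
    SpanOk l1 l2 ws r r := by
  unfold SpanOk at *; omega

lemma spanOk_mono_p {l1 l2 ws : Int} {p q r : Nat} (hpr : p ≤ r) (hrq : r ≤ q)
    (h : SpanOk l1 l2 ws p q) : SpanOk l1 l2 ws r q := by
  unfold SpanOk at *; omega

lemma occAt_add_le {name cs : List Char} {p : Nat} (h : OccAt name cs p) (hp : p ≤ cs.length) :
    p + name.length ≤ cs.length := by
  have := h.length_le
  simp [List.length_drop] at this
  omega

lemma occAt_nil (cs : List Char) (p : Nat) : OccAt [] cs p := List.nil_prefix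

lemma invLast_step_hit {name cs : List Char} {t : Nat} {last : Option Int}
    (h : InvLast name cs t last) (ho : OccAt name cs t) :
    InvLast name cs (t + 1) (some (t : Int)) := by
  constructor
  · rintro x hx
    exact ⟨t, by simpa using hx.symm, by omega, ho⟩
  · rintro p hp hop
    exact ⟨t, rfl, by omega, by omega, ho⟩

lemma invLast_step_miss {name cs : List Char} {t : Nat} {last : Option Int}
    (h : InvLast name cs t last) (ho : ¬ OccAt name cs t) :
    InvLast name cs (t + 1) last := by
  constructor
  · rintro x hx
    obtain ⟨r, hr1, hr2, hr3⟩ := h.1 x hx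
    exact ⟨r, hr1, by omega, hr3⟩
  · rintro p hp hop
    have hpt : p < t := by
      rcases Nat.lt_succ_iff_lt_or_eq.mp hp with h' | rfl
      · exact h'
      · exact absurd hop ho
    obtain ⟨r, hr1, hr2, hr3, hr4⟩ := h.2 p hpt hop
    exact ⟨r, hr1, hr2, by omega, hr4⟩

-- the slice test in the loop is exactly OccAt
lemma slice_beq_iff (name cs : List Char) (t : Nat) :
    (PySem.List.slice cs (some (t : Int)) (some ((t : Int) + (name.length : Int))) == name) = true
      ↔ OccAt name cs t := by
  rw [beq_iff_eq, PySem.List.slice_natCast_add]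
  unfold OccAt
  constructor
  · intro h; rw [List.prefix_iff_eq_take]; exact h.symm
  · intro h; exact (List.prefix_iff_eq_take.mp h).symm

lemma altLoop_iff (a b cs : List Char) (ws : Int) :
    ∀ (k t : Nat), t + k = cs.length + 1 →
    ∀ (last1 last2 : Option Int),
    InvLast a cs t last1 → InvLast b cs t last2 →
    (altLoop a b cs (a.length : Int) (b.length : Int) ws
        (PySem.List.pyRange (t : Int) ((cs.length : Int) + 1) 1) last1 last2 = true
      ↔ ∃ p q : Nat, p ≤ cs.length ∧ q ≤ cs.length ∧ OccAt a cs p ∧ OccAt b cs q ∧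
          SpanOk a.length b.length ws p q ∧ t ≤ max p q) := by
  intro k
  induction k with
  | zero =>
    intro t ht last1 last2 _ _
    have hnil : ((cs.length : Int) + 1) ≤ (t : Int) := by omega
    rw [PySem.List.pyRange_one_eq_nil hnil]
    simp only [altLoop]
    constructor
    · intro h; exact absurd h (by simp)
    · rintro ⟨p, q, hp, hq, _, _, _, hmax⟩
      omega
  | succ k ih =>
    intro t ht last1 last2 inv1 inv2
    have htn : t ≤ cs.length := by omega
    have hcons : PySem.List.pyRange (t : Int) ((cs.length : Int) + 1) 1
        = (t : Int) :: PySem.List.pyRange ((t : Int) + 1) ((cs.length : Int) + 1) 1 :=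
      PySem.List.pyRange_one_cons (by omega)
    have hcast : ((t : Int) + 1) = (((t + 1 : Nat)) : Int) := by push_cast; ring
    rw [hcons, hcast]
    -- boolean values of the two slice tests
    have es1 : (PySem.List.slice cs (some (t : Int)) (some ((t : Int) + (a.length : Int))) == a)
        = decide (OccAt a cs t) := by
      by_cases h : OccAt a cs t
      · rw [(slice_beq_iff a cs t).mpr h, decide_eq_true h]
      · have hf : (PySem.List.slice cs (some (t : Int)) (some ((t : Int) + (a.length : Int))) == a) = false := by
          rw [Bool.eq_false_iff]
          intro hx
          exact h ((slice_beq_iff a cs t).mp hx)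
        rw [hf, decide_eq_false h]
    have es2 : (PySem.List.slice cs (some (t : Int)) (some ((t : Int) + (b.length : Int))) == b)
        = decide (OccAt b cs t) := by
      by_cases h : OccAt b cs t
      · rw [(slice_beq_iff b cs t).mpr h, decide_eq_true h]
      · have hf : (PySem.List.slice cs (some (t : Int)) (some ((t : Int) + (b.length : Int))) == b) = false := by
          rw [Bool.eq_false_iff]
          intro hx
          exact h ((slice_beq_iff b cs t).mp hx)
        rw [hf, decide_eq_false h]
    simp only [altLoop, es1, es2]
    have hif : ∀ (c x : Bool), (if c then true else x) = (c || x) := by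
      intro c x; cases c <;> simp
    rw [hif]
    -- the recursive call via the induction hypothesis
    by_cases h1 : OccAt a cs t <;> by_cases h2 : OccAt b cs t <;>
      simp only [h1, h2, decide_true, decide_false, Bool.false_eq_true, eq_self_iff_true,
        if_true, if_false, Bool.true_and, Bool.false_and, Bool.false_or, Bool.or_false,
        Bool.or_eq_true, Bool.and_eq_true, decide_eq_true_eq]
    -- four cases on whether each name occurs at t
    next =>
      have inv1' := invLast_step_hit inv1 h1
      have inv2' := invLast_step_hit inv2 h2
      rw [ih (t + 1) (by omega) _ _ inv1' inv2']
      constructor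
      · rintro ((hf1 | hf2) | hrec)
        · rcases last2 with _ | x2
          · exact (Bool.false_ne_true hf1).elim
          · obtain ⟨qn, rfl, hq2, hoq⟩ := inv2.1 x2 rfl
            have hf1' : max ((t : Int) + a.length) ((qn : Int) + b.length) - qn ≤ ws :=
              of_decide_eq_true hf1
            exact ⟨t, qn, htn, by omega, h1, hoq, by unfold SpanOk; omega, by omega⟩
        · exact ⟨t, t, htn, htn, h1, h2, by unfold SpanOk; omega, by omega⟩
        · obtain ⟨p, q, c1, c2, c3, c4, c5, c6⟩ := hrec
          exact ⟨p, q, c1, c2, c3, c4, c5, by omega⟩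
      · rintro ⟨p, q, hpn, hqn, hop, hoq, hsp, hmx⟩
        by_cases hm : t + 1 ≤ max p q
        · exact Or.inr ⟨p, q, hpn, hqn, hop, hoq, hsp, hm⟩
        · left; right
          have hdiag : SpanOk (a.length : Int) (b.length : Int) ws t t := by
            by_cases hpq : p ≤ q
            · exact spanOk_diag (spanOk_mono_p hpq le_rfl hsp)
            · exact spanOk_diag (spanOk_mono_q (by omega) le_rfl hsp)
          unfold SpanOk at hdiag
          omega
    next =>
      have inv1' := invLast_step_hit inv1 h1
      have inv2' := invLast_step_miss inv2 h2
      rw [ih (t + 1) (by omega) _ _ inv1' inv2']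
      constructor
      · rintro (hf1 | hrec)
        · rcases last2 with _ | x2
          · exact (Bool.false_ne_true hf1).elim
          · obtain ⟨qn, rfl, hq2, hoq⟩ := inv2.1 x2 rfl
            have hf1' : max ((t : Int) + a.length) ((qn : Int) + b.length) - qn ≤ ws :=
              of_decide_eq_true hf1
            exact ⟨t, qn, htn, by omega, h1, hoq, by unfold SpanOk; omega, by omega⟩
        · obtain ⟨p, q, c1, c2, c3, c4, c5, c6⟩ := hrec
          exact ⟨p, q, c1, c2, c3, c4, c5, by omega⟩
      · rintro ⟨p, q, hpn, hqn, hop, hoq, hsp, hmx⟩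
        by_cases hm : t + 1 ≤ max p q
        · exact Or.inr ⟨p, q, hpn, hqn, hop, hoq, hsp, hm⟩
        · left
          have hqt : q < t := by
            by_contra h'
            have hq : q = t := by omega
            subst hq
            exact h2 hoq
          have hpt : p = t := by omega
          subst hpt
          obtain ⟨r, hr1, hr2, hr3, hr4⟩ := inv2.2 q hqt hoq
          rw [hr1]
          have hsp' : SpanOk (a.length : Int) (b.length : Int) ws p r :=
            spanOk_mono_q hr2 (by omega) hsp
          unfold SpanOk at hsp'
          exact decide_eq_true (by omega)
    next =>
      have inv1' := invLast_step_miss inv1 h1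
      have inv2' := invLast_step_hit inv2 h2
      rw [ih (t + 1) (by omega) _ _ inv1' inv2']
      constructor
      · rintro (hf2 | hrec)
        · rcases last1 with _ | x1
          · exact (Bool.false_ne_true hf2).elim
          · obtain ⟨pn, rfl, hp2, hop⟩ := inv1.1 x1 rfl
            have hf2' : max ((pn : Int) + a.length) ((t : Int) + b.length) - pn ≤ ws :=
              of_decide_eq_true hf2
            exact ⟨pn, t, by omega, htn, hop, h2, by unfold SpanOk; omega, by omega⟩
        · obtain ⟨p, q, c1, c2, c3, c4, c5, c6⟩ := hrec
          exact ⟨p, q, c1, c2, c3, c4, c5, by omega⟩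
      · rintro ⟨p, q, hpn, hqn, hop, hoq, hsp, hmx⟩
        by_cases hm : t + 1 ≤ max p q
        · exact Or.inr ⟨p, q, hpn, hqn, hop, hoq, hsp, hm⟩
        · left
          have hpt : p < t := by
            by_contra h'
            have hp : p = t := by omega
            subst hp
            exact h1 hop
          have hqt : q = t := by omega
          subst hqt
          obtain ⟨r, hr1, hr2, hr3, hr4⟩ := inv1.2 p hpt hop
          rw [hr1]
          have hsp' : SpanOk (a.length : Int) (b.length : Int) ws r q :=
            spanOk_mono_p hr2 (by omega) hsp
          unfold SpanOk at hsp'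
          exact decide_eq_true (by omega)
    next =>
      have inv1' := invLast_step_miss inv1 h1
      have inv2' := invLast_step_miss inv2 h2
      rw [ih (t + 1) (by omega) _ _ inv1' inv2']
      constructor
      · rintro ⟨p, q, c1, c2, c3, c4, c5, c6⟩
        exact ⟨p, q, c1, c2, c3, c4, c5, by omega⟩
      · rintro ⟨p, q, hpn, hqn, hop, hoq, hsp, hmx⟩
        by_cases hm : t + 1 ≤ max p q
        · exact ⟨p, q, hpn, hqn, hop, hoq, hsp, hm⟩
        · exfalso
          have hor : p = t ∨ q = t := by omega
          rcases hor with rfl | rfl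
          · exact h1 hop
          · exact h2 hoq

lemma alt_iff (name1 name2 text : String) (ws : Int) (hne : text ≠ "") :
    are_co_occurring_alt name1 name2 text ws = true
      ↔ CoSpec name1.toList name2.toList text.toList ws := by
  unfold are_co_occurring_alt
  rw [if_neg hne]
  simp only [PySem.Str.len_eq]
  have inv0 : ∀ name : List Char, InvLast name text.toList 0 none := by
    intro name
    constructor
    · intro x hx; cases hx
    · intro p hp _; exact absurd hp (Nat.not_lt_zero p)
  have h := altLoop_iff name1.toList name2.toList text.toList ws
    (text.toList.length + 1) 0 (by omega) none none (inv0 _) (inv0 _)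
  simp only [Nat.cast_zero] at h
  rw [h]
  unfold CoSpec
  constructor
  · rintro ⟨p, q, c1, c2, c3, c4, c5, _⟩
    exact ⟨p, q, c1, c2, c3, c4, c5⟩
  · rintro ⟨p, q, c1, c2, c3, c4, c5⟩
    exact ⟨p, q, c1, c2, c3, c4, c5, Nat.zero_le _⟩

-- window membership characterised by occurrence positions
lemma isIn_window_iff (a cs : List Char) (k w : Nat) :
    PySem.Chars.isIn a ((cs.drop k).take w) = true
      ↔ ∃ p : Nat, k ≤ p ∧ p + a.length ≤ k + w ∧ OccAt a cs p := by
  rw [← PySem.Chars.exists_prefix_drop_iff_isIn]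
  constructor
  · rintro ⟨j, hj⟩
    rw [List.drop_take, List.drop_drop] at hj
    have hj' := List.prefix_take_iff.mp hj
    by_cases hjw : j ≤ w
    · exact ⟨k + j, by omega, by have := hj'.2; omega, by
        unfold OccAt; exact hj'.1⟩
    · have ha : a = [] := by
        have := hj'.2
        have : a.length = 0 := by omega
        exact List.eq_nil_of_length_eq_zero this
      exact ⟨k, le_rfl, by simp [ha], by rw [ha]; exact occAt_nil cs k⟩
  · rintro ⟨p, hkp, hlen, hocc⟩
    refine ⟨p - k, ?_⟩
    rw [List.drop_take, List.drop_drop]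
    rw [List.prefix_take_iff]
    constructor
    · have hk : k + (p - k) = p := by omega
      rw [hk]; exact hocc
    · omega

lemma a_iff (name1 name2 text : String) (ws : Int) (hne : text ≠ "")
    (hws : 0 ≤ ws) (hlen : ws ≤ (text.toList.length : Int)) :
    are_co_occurring name1 name2 text ws = true
      ↔ CoSpec name1.toList name2.toList text.toList ws := by
  unfold are_co_occurring
  rw [if_neg hne, List.any_eq_true]
  have hmax : max 0 (PySem.Str.len text - ws + 1) = (text.toList.length : Int) - ws + 1 := by
    rw [PySem.Str.len_eq]; omega
  rw [hmax]
  have hwin : ∀ i : Int, 0 ≤ i → ∀ name : String,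
      (PySem.Str.isIn name (PySem.Str.slice text (some i) (some (i + ws))) = true
        ↔ ∃ p : Nat, i.toNat ≤ p ∧ p + name.toList.length ≤ i.toNat + ws.toNat ∧
            OccAt name.toList text.toList p) := by
    intro i hi0 name
    rw [PySem.Str.isIn_eq, PySem.Str.toList_slice, PySem.Chars.slice_eq_listSlice,
        PySem.List.slice_toNat text.toList hi0 (by omega)]
    have hww : (i + ws).toNat - i.toNat = ws.toNat := by omega
    rw [hww]
    exact isIn_window_iff _ _ _ _
  constructor
  · rintro ⟨i, him, hP⟩
    rw [PySem.List.mem_pyRange_one] at him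
    simp only [Bool.and_eq_true] at hP
    obtain ⟨p, hp1, hp2, hp3⟩ := (hwin i him.1 name1).mp hP.1
    obtain ⟨q, hq1, hq2, hq3⟩ := (hwin i him.1 name2).mp hP.2
    have him2 := him.2
    have him1 := him.1
    exact ⟨p, q, by omega, by omega, hp3, hq3, by unfold SpanOk; omega⟩
  · rintro ⟨p, q, hpn, hqn, hop, hoq, hsp⟩
    unfold SpanOk at hsp
    have hpl := occAt_add_le hop hpn
    have hql := occAt_add_le hoq hqn
    refine ⟨min (min (p : Int) (q : Int)) ((text.toList.length : Int) - ws), ?_, ?_⟩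
    · rw [PySem.List.mem_pyRange_one]
      constructor <;> omega
    · simp only [Bool.and_eq_true]
      constructor
      · rw [hwin _ (by omega) name1]
        exact ⟨p, by omega, by omega, hop⟩
      · rw [hwin _ (by omega) name2]
        exact ⟨q, by omega, by omega, hoq⟩

lemma a_false_short (name1 name2 text : String) (ws : Int)
    (hlen : (text.toList.length : Int) < ws) :
    are_co_occurring name1 name2 text ws = false := by
  unfold are_co_occurring
  split
  · rfl
  · have h0 : max 0 (PySem.Str.len text - ws + 1) = 0 := by
      rw [PySem.Str.len_eq]; omega
    rw [h0, PySem.List.pyRange_one_eq_nil le_rfl]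
    rfl

lemma occAt_clamp {a cs : List Char} {j : Nat} (h : a <+: cs.drop j) :
    OccAt a cs (min j cs.length) := by
  by_cases hj : j ≤ cs.length
  · rw [min_eq_left hj]; exact h
  · have hd : cs.drop j = [] := List.drop_eq_nil_of_le (by omega)
    rw [hd] at h
    have ha : a = [] := List.prefix_nil.mp h
    rw [ha]; exact occAt_nil _ _

lemma coSpec_of_isIn (a b cs : List Char) (ws : Int)
    (hlen : (cs.length : Int) < ws)
    (h1 : PySem.Chars.isIn a cs = true) (h2 : PySem.Chars.isIn b cs = true) :
    CoSpec a b cs ws := by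
  obtain ⟨j1, hj1⟩ := (PySem.Chars.exists_prefix_drop_iff_isIn a cs).mpr h1
  obtain ⟨j2, hj2⟩ := (PySem.Chars.exists_prefix_drop_iff_isIn b cs).mpr h2
  have ho1 := occAt_clamp hj1
  have ho2 := occAt_clamp hj2
  have hp1 : min j1 cs.length ≤ cs.length := by omega
  have hp2 : min j2 cs.length ≤ cs.length := by omega
  have hl1 := occAt_add_le ho1 hp1
  have hl2 := occAt_add_le ho2 hp2
  exact ⟨_, _, hp1, hp2, ho1, ho2, by unfold SpanOk; omega⟩

lemma isIn_of_occAt {a cs : List Char} {p : Nat} (h : OccAt a cs p) :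
    PySem.Chars.isIn a cs = true := by
  rw [PySem.Chars.isIn_iff_infix]
  exact h.isInfix.trans (cs.drop_suffix p).isInfix

-- ===== VERDICT (by name: the statement is the Claim_ definition above) =====
theorem are_co_occurring_spec : Claim_unchanged_are_co_occurring := by
  unfold Claim_unchanged_are_co_occurring
  intro name1 name2 text ws _ hpre
  unfold Spec_are_co_occurring
  intro hD
  unfold Pre_are_co_occurring at hpre
  by_cases hne : text = ""
  · subst hne
    simp [are_co_occurring, are_co_occurring_alt]
  · by_cases hlen : ws ≤ (text.toList.length : Int)
    · have hA := a_iff name1 name2 text ws hne hpre hlen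
      have hB := alt_iff name1 name2 text ws hne
      exact Bool.eq_iff_iff.mpr (hA.trans hB.symm)
    · push_neg at hlen
      have hAf := a_false_short name1 name2 text ws hlen
      unfold D_are_co_occurring at hD
      push_neg at hD
      have hBf : are_co_occurring_alt name1 name2 text ws = false := by
        rw [Bool.eq_false_iff]
        intro hBt
        obtain ⟨p, q, hpn, hqn, hop, hoq, _⟩ := (alt_iff name1 name2 text ws hne).mp hBt
        exact (hD hne (by rw [PySem.Str.len_eq]; omega)
            (by rw [PySem.Str.isIn_eq]; exact isIn_of_occAt hop))
          (by rw [PySem.Str.isIn_eq]; exact isIn_of_occAt hoq)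
      rw [hAf, hBf]

theorem are_co_occurring_changed : Claim_changed_are_co_occurring := by
  unfold Claim_changed_are_co_occurring; decide

theorem are_co_occurring_tight : Claim_exact_are_co_occurring := by
  unfold Claim_exact_are_co_occurring
  intro name1 name2 text ws _ _ hD
  obtain ⟨hne, hlen, hi1, hi2⟩ := hD
  rw [PySem.Str.len_eq] at hlen
  have hAf := a_false_short name1 name2 text ws hlen
  have hBt : are_co_occurring_alt name1 name2 text ws = true :=
    (alt_iff name1 name2 text ws hne).mpr
      (coSpec_of_isIn _ _ _ ws hlen
        (by rw [PySem.Str.isIn_eq] at hi1; exact hi1)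
        (by rw [PySem.Str.isIn_eq] at hi2; exact hi2))
  rw [hAf, hBt]
  simp
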